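-- pv_equiv track=rewrite | github.com/xingdi-eric-yuan/imrc_public | generic.py | get_answer_position
-- ===== SOURCE A (Python) =====
-- def get_answer_position(list_of_strings, list_of_answers):
--     res = []
--     for i in range(len(list_of_strings)):
--         if list_of_answers[i] not in list_of_strings[i]:
--             res.append([0, 0])
--         else:
--             story = list_of_strings[i].split()
--             answer = list_of_answers[i].split()
--             tmp = [0, 0]
--             for j in range(len(story)):
--                 if story[j] != answer[0]:
--                     continue
--                 if story[j: j + len(answer)] == answer:
--                     tmp = [j, j + len(answer) - 1]
--                     break
--             res.append(tmp)
--     return res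
-- ===== SOURCE B (Python) =====
-- # Rabin-Karp: rolling polynomial hash over token hashes; verify on hash hit.
-- _P = (1 << 61) - 1
-- _B = 1000003
--
-- def _tokhash(tok):
--     h = 0
--     for c in tok:
--         h = (h * 131 + ord(c)) % _P
--     return h
--
-- def _find_span(story, answer):
--     if answer not in story:
--         return [0, 0]
--     toks = story.split()
--     ans = answer.split()
--     n, m = len(toks), len(ans)
--     if m == 0 or m > n:
--         return [0, 0]
--     hv = [_tokhash(t) for t in toks]
--     target = 0
--     for t in ans:
--         target = (target * _B + _tokhash(t)) % _P
--     h = 0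
--     for x in hv[:m]:
--         h = (h * _B + x) % _P
--     top = pow(_B, m - 1, _P)
--     for j in range(n - m + 1):
--         if h == target and toks[j:j + m] == ans:
--             return [j, j + m - 1]
--         if j + m < n:
--             h = ((h - hv[j] * top) * _B + hv[j + m]) % _P
--     return [0, 0]
--
-- def get_answer_position(list_of_strings, list_of_answers):
--     return [_find_span(s, a) for s, a in zip(list_of_strings, list_of_answers)]
-- ===== Notes on version B (the rewrite author's own statement) =====
-- stated objective: alternative
-- what changed: B replaces A's naive first-match scan (compare the token slice at every candidate start, prefiltered on the first token) by Rabin-Karp: a rolling polynomial hash over per-token hashes with slice verification only on a hash hit; Pre_ excludes only inputs where A raises IndexError (answers list shorter than stories, or an answer that is a substring of a tokenised story but itself splits to no tokens).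
import Mathlib
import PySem

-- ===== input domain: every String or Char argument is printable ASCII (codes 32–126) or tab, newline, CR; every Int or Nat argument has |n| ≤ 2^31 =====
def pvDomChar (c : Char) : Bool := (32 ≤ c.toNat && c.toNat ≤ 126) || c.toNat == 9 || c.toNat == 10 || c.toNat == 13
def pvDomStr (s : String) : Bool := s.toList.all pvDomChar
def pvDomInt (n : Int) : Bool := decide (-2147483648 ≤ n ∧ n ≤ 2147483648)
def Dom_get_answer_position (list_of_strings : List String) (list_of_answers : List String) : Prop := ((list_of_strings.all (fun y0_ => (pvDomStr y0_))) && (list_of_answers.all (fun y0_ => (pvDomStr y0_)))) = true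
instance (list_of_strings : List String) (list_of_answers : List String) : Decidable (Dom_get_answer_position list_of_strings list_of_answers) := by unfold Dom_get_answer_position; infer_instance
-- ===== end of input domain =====

-- B replaces A's naive scan (compare the token slice at every candidate start) by
-- Rabin-Karp: a rolling polynomial hash over per-token hashes, verifying the slice
-- only on a hash hit; equal cost in the worst case, sublinear slice comparisons in practice.

-- ===== PORT A =====
-- A's inner loop 'for j in range(len(story)):' with continue/break, as recursion on j.
-- a0 stands for answer[0]; inside Pre_ the loop body only runs when answer ≠ []
-- (Python raises IndexError there otherwise, excluded by Pre_).
def gapScanA (story answer : List String) (a0 : String) : Nat → Nat → List Int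
  | 0, _ => [0, 0]
  | fuel + 1, j =>
    if story.getD j "" ≠ a0 then gapScanA story answer a0 fuel (j + 1)
    else if PySem.List.slice story (some (j : Int)) (some ((j : Int) + (answer.length : Int))) = answer then
      [(j : Int), (j : Int) + (answer.length : Int) - 1]
    else gapScanA story answer a0 fuel (j + 1)

def get_answer_position (list_of_strings : List String) (list_of_answers : List String) : List (List Int) :=
  (PySem.List.pyRange 0 list_of_strings.length 1).foldl (fun res i =>
    let s := PySem.List.pyGetD list_of_strings i ""
    let a := PySem.List.pyGetD list_of_answers i ""
    if PySem.Str.isIn a s = false then res ++ [[0, 0]]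
    else
      let story := PySem.Str.split₀ s
      let answer := PySem.Str.split₀ a
      res ++ [gapScanA story answer (answer.headD "") story.length 0]) []

-- ===== PORT B =====
def rkP : Int := 2305843009213693951   -- (1 << 61) - 1
def rkB : Int := 1000003

-- h = (h * 131 + ord(c)) % _P over the characters of the token
def tokhash (tok : String) : Int :=
  tok.toList.foldl (fun h c => PySem.Int.mod (h * 131 + (c.toNat : Int)) rkP) 0

-- 'for j in range(n - m + 1):' (n - m + 1 iterations) with early return and the conditional hash roll.
def rkLoop (toks ans : List String) (hv : List Int) (target top : Int) : Nat → Nat → Int → List Int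
  | 0, _, _ => [0, 0]
  | fuel + 1, j, h =>
    if h = target ∧ PySem.List.slice toks (some (j : Int)) (some ((j : Int) + (ans.length : Int))) = ans then
      [(j : Int), (j : Int) + (ans.length : Int) - 1]
    else
      rkLoop toks ans hv target top fuel (j + 1)
        (if j + ans.length < toks.length then
           PySem.Int.mod ((h - hv.getD j 0 * top) * rkB + hv.getD (j + ans.length) 0) rkP
         else h)

def findSpanB (story answer : String) : List Int :=
  if PySem.Str.isIn answer story = false then [0, 0]
  else
    let toks := PySem.Str.split₀ story
    let ans := PySem.Str.split₀ answer
    if ans.length = 0 ∨ toks.length < ans.length then [0, 0]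
    else
      let hv := toks.map tokhash
      let target := ans.foldl (fun t s => PySem.Int.mod (t * rkB + tokhash s) rkP) 0
      let h0 := (hv.take ans.length).foldl (fun h x => PySem.Int.mod (h * rkB + x) rkP) 0
      let top := PySem.Int.mod (rkB ^ (ans.length - 1)) rkP   -- pow(_B, m-1, _P)
      rkLoop toks ans hv target top (toks.length - ans.length + 1) 0 h0

def get_answer_position_alt (list_of_strings : List String) (list_of_answers : List String) : List (List Int) :=
  List.zipWith findSpanB list_of_strings list_of_answers

-- ===== PRECONDITION & SPEC =====
-- Pre_ excludes exactly the inputs on which Python A raises IndexError: an answers list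
-- shorter than the stories list, and an answer that is a substring of a story with tokens
-- while the answer itself splits to no tokens (answer[0]).
def Pre_get_answer_position (list_of_strings : List String) (list_of_answers : List String) : Prop :=
  list_of_strings.length ≤ list_of_answers.length ∧
  ((List.range list_of_strings.length).all (fun i =>
      !(PySem.Str.split₀ (list_of_answers.getD i "") == ([] : List String)
        && !(PySem.Str.split₀ (list_of_strings.getD i "") == ([] : List String))
        && PySem.Str.isIn (list_of_answers.getD i "") (list_of_strings.getD i "")))) = true
instance (list_of_strings : List String) (list_of_answers : List String) : Decidable (Pre_get_answer_position list_of_strings list_of_answers) := by unfold Pre_get_answer_position; infer_instance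

def pvWitness_get_answer_position : List String × List String := (["a b c", "x"], ["b c", "y"])

def Spec_get_answer_position (list_of_strings : List String) (list_of_answers : List String) (out : List (List Int)) : Prop := out = get_answer_position_alt list_of_strings list_of_answers
instance (list_of_strings : List String) (list_of_answers : List String) (out : List (List Int)) : Decidable (Spec_get_answer_position list_of_strings list_of_answers out) := by unfold Spec_get_answer_position; infer_instance

-- ===== CLAIM (what is proved, stated in full; the proofs are below) =====
def Claim_equal_get_answer_position : Prop := ∀ (list_of_strings : List String) (list_of_answers : List String), Dom_get_answer_position list_of_strings list_of_answers → Pre_get_answer_position list_of_strings list_of_answers → Spec_get_answer_position list_of_strings list_of_answers (get_answer_position list_of_strings list_of_answers)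

-- ===== LEMMAS AND PROOFS =====

-- Does story[k : k+m] equal answer (token level)?
def pMatch (story answer : List String) (k : Nat) : Bool :=
  decide ((story.drop k).take answer.length = answer)

-- first match at index >= j (upward search, mirrors A's scan)
def fmUp (story answer : List String) (j : Nat) : Option Nat :=
  if j < story.length then
    if pMatch story answer j then some j else fmUp story answer (j + 1)
  else none
termination_by story.length - j

theorem take_eq_cons_head {l : List String} {n : Nat} {x : String} {xs : List String}
    (h : l.take n = x :: xs) : ∃ t, l = x :: t := by
  cases l with
  | nil => simp at h
  | cons b t =>
    cases n with
    | zero => simp at h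
    | succ n => rw [List.take_succ_cons] at h; exact ⟨t, by rw [(List.cons.injEq ..).mp h |>.1]⟩

theorem getD_of_drop_cons (story : List String) (j : Nat) (a0 : String) (t : List String)
    (ht : story.drop j = a0 :: t) : story.getD j "" = a0 := by
  have h2 : story[j]? = some a0 := by
    have := (List.getElem?_drop (xs := story) (i := j) (j := 0)).symm
    rw [ht] at this; simpa using this
  simp [List.getD_eq_getElem?_getD, h2]

theorem gapScanA_eq_fmUp (story : List String) (a0 : String) (rest : List String) :
    ∀ (fuel j : Nat), fuel = story.length - j →
    gapScanA story (a0 :: rest) a0 fuel j =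
      match fmUp story (a0 :: rest) j with
      | some k => [(k : Int), (k : Int) + ((a0 :: rest).length : Int) - 1]
      | none => [0, 0] := by
  intro fuel
  induction fuel with
  | zero =>
      intro j hf
      rw [gapScanA, fmUp, if_neg (by omega)]
  | succ fuel ih =>
      intro j hf
      have hlt : j < story.length := by omega
      rw [gapScanA]
      by_cases hne : story.getD j "" ≠ a0
      · rw [if_pos hne, ih (j + 1) (by omega)]
        have hnm : pMatch story (a0 :: rest) j = false := by
          apply decide_eq_false
          intro hm
          obtain ⟨t, ht⟩ := take_eq_cons_head hm
          exact hne (getD_of_drop_cons story j a0 t ht)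
        conv_rhs => rw [fmUp]
        simp [hlt, hnm]
      · rw [if_neg hne]
        by_cases hsl : PySem.List.slice story (some (j : Int))
            (some ((j : Int) + ((a0 :: rest).length : Int))) = a0 :: rest
        · have hm : pMatch story (a0 :: rest) j = true := by
            apply decide_eq_true
            rw [← PySem.List.slice_natCast_add]; exact hsl
          rw [if_pos hsl]
          conv_rhs => rw [fmUp]
          simp [hlt, hm]
        · have hnm : pMatch story (a0 :: rest) j = false := by
            apply decide_eq_false
            rw [← PySem.List.slice_natCast_add]; exact hsl
          rw [if_neg hsl, ih (j + 1) (by omega)]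
          conv_rhs => rw [fmUp]
          simp [hlt, hnm]

theorem fmUp_eq_find? (story answer : List String) (j : Nat) :
    fmUp story answer j = (List.range' j (story.length - j)).find? (pMatch story answer) := by
  fun_induction fmUp story answer j with
  | case1 j hlt hm =>
      have h1 : story.length - j = (story.length - (j + 1)) + 1 := by omega
      rw [h1, List.range'_succ,
        List.find?_cons_of_pos (p := pMatch story answer)
          (l := List.range' (j + 1) (story.length - (j + 1))) hm]
  | case2 j hlt hm ih =>
      have h1 : story.length - j = (story.length - (j + 1)) + 1 := by omega
      rw [h1, List.range'_succ,
        List.find?_cons_of_neg (p := pMatch story answer)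
          (l := List.range' (j + 1) (story.length - (j + 1))) (by simp [hm]), ih]
  | case3 j hlt =>
      have h1 : story.length - j = 0 := by omega
      rw [h1]; rfl

theorem pMatch_bound {story answer : List String} {k : Nat}
    (hne : answer ≠ []) (h : pMatch story answer k = true) :
    k + answer.length ≤ story.length := by
  have hm : (story.drop k).take answer.length = answer := of_decide_eq_true h
  have hlen := congrArg List.length hm
  simp [List.length_take, List.length_drop] at hlen
  have hm1 : 1 ≤ answer.length := List.length_pos_iff.mpr hne
  omega

-- ----- Rabin-Karp side -----

-- unreduced polynomial value of a list of token hashes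
def polyH (xs : List Int) : Int := xs.foldl (fun h x => h * rkB + x) 0

theorem rkP_pos : (0 : Int) < rkP := by decide

theorem pymod_emod (a : Int) : PySem.Int.mod a rkP = a % rkP :=
  PySem.Int.mod_eq_emod_of_pos (a := a) rkP_pos

theorem polyH_foldl (xs : List Int) (h : Int) :
    xs.foldl (fun h x => h * rkB + x) h = h * rkB ^ xs.length + polyH xs := by
  induction xs generalizing h with
  | nil => simp [polyH]
  | cons x xs ih =>
      have h2 : polyH (x :: xs) = x * rkB ^ xs.length + polyH xs := by
        have := ih x
        simpa [polyH] using this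
      simp only [List.foldl_cons, ih (h * rkB + x), h2, List.length_cons]
      ring

theorem polyH_cons (x : Int) (xs : List Int) :
    polyH (x :: xs) = x * rkB ^ xs.length + polyH xs := by
  have := polyH_foldl xs x
  simpa [polyH] using this

theorem polyH_append_singleton (xs : List Int) (b : Int) :
    polyH (xs ++ [b]) = polyH xs * rkB + b := by
  simp [polyH, List.foldl_append]

theorem foldl_mod (xs : List Int) (h0 : Int) :
    xs.foldl (fun h x => PySem.Int.mod (h * rkB + x) rkP) (PySem.Int.mod h0 rkP)
      = (xs.foldl (fun h x => h * rkB + x) h0) % rkP := by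
  induction xs generalizing h0 with
  | nil => simp [pymod_emod]
  | cons x xs ih =>
      simp only [List.foldl_cons]
      have e1 : PySem.Int.mod (PySem.Int.mod h0 rkP * rkB + x) rkP
          = PySem.Int.mod (h0 * rkB + x) rkP := by
        simp only [pymod_emod]
        have hmm0 : Int.ModEq rkP (h0 % rkP) h0 := Int.emod_emod_of_dvd h0 dvd_rfl
        exact (hmm0.mul_right rkB).add_right x
      rw [e1, ih (h0 * rkB + x)]

-- rolling-hash step: removing the leading token and appending the next one
theorem windowStep (hv : List Int) (j m : Nat) (hm1 : 1 ≤ m) (hlt : j + m < hv.length) :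
    (polyH ((hv.drop j).take m) - hv.getD j 0 * rkB ^ (m - 1)) * rkB + hv.getD (j + m) 0
      = polyH ((hv.drop (j + 1)).take m) := by
  have hj : j < hv.length := by omega
  have hjm : j + m < hv.length := hlt
  have hd : hv.drop j = hv[j] :: hv.drop (j + 1) := List.drop_eq_getElem_cons hj
  have hgd : hv.getD j 0 = hv[j] := List.getD_eq_getElem hv 0 hj
  have hgd2 : hv.getD (j + m) 0 = hv[j + m] := List.getD_eq_getElem hv 0 hjm
  have hmm : m = (m - 1) + 1 := by omega
  have htlen : ((hv.drop (j + 1)).take (m - 1)).length = m - 1 := by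
    simp [List.length_take, List.length_drop]
    omega
  have hwj : (hv.drop j).take m = hv[j] :: (hv.drop (j + 1)).take (m - 1) := by
    conv_lhs => rw [hd, hmm, List.take_succ_cons]
  have hidx : (j + 1) + (m - 1) = j + m := by omega
  have hget : (hv.drop (j + 1))[m - 1]? = some hv[j + m] := by
    rw [List.getElem?_drop, hidx, List.getElem?_eq_getElem hjm]
  have hwj1 : (hv.drop (j + 1)).take m = (hv.drop (j + 1)).take (m - 1) ++ [hv[j + m]] := by
    conv_lhs => rw [hmm]
    rw [List.take_add_one, hget]
    rfl
  rw [hwj, hwj1, polyH_cons, polyH_append_singleton, htlen, hgd, hgd2]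
  ring

theorem rkLoop_fuel (toks ans : List String) (hv : List Int) (target top : Int)
    (hhv : hv = toks.map tokhash)
    (hm1 : 1 ≤ ans.length)
    (hmn : ans.length ≤ toks.length)
    (htarget : target = polyH (ans.map tokhash) % rkP)
    (htop : top = rkB ^ (ans.length - 1) % rkP) :
    ∀ (fuel j : Nat) (h : Int), toks.length - ans.length + 1 - j = fuel → j ≤ toks.length - ans.length + 1 →
      (j + ans.length ≤ toks.length → h = polyH ((hv.drop j).take ans.length) % rkP) →
      rkLoop toks ans hv target top fuel j h =
        match (List.range' j fuel).find? (pMatch toks ans) with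
        | some k => [(k : Int), (k : Int) + (ans.length : Int) - 1]
        | none => [0, 0] := by
  intro fuel
  induction fuel with
  | zero =>
      intro j h _ _ _
      rw [rkLoop]
      rfl
  | succ fuel ih =>
      intro j h hfuel hjle hinv
      have hjK : j < toks.length - ans.length + 1 := by omega
      have hjm : j + ans.length ≤ toks.length := by omega
      have hlenhv : hv.length = toks.length := by rw [hhv]; simp
      have hwmap : (hv.drop j).take ans.length = ((toks.drop j).take ans.length).map tokhash := by
        rw [hhv, (List.map_drop ..).symm, (List.map_take ..).symm]
      rw [rkLoop]
      have hrange : List.range' j (fuel + 1) = j :: List.range' (j + 1) fuel := by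
        rw [List.range'_succ]
      by_cases hp : pMatch toks ans j = true
      · have hsl : (toks.drop j).take ans.length = ans := of_decide_eq_true hp
        have hh : h = target := by
          rw [hinv hjm, hwmap, hsl, htarget]
        rw [if_pos ⟨hh, by rw [PySem.List.slice_natCast_add, hsl]⟩, hrange,
          List.find?_cons_of_pos hp]
      · have hnsl : ¬ (toks.drop j).take ans.length = ans := fun hc => hp (decide_eq_true hc)
        rw [if_neg (by
          rintro ⟨-, hsl⟩
          rw [PySem.List.slice_natCast_add] at hsl
          exact hnsl hsl)]
        have hstep : (j + 1) + ans.length ≤ toks.length →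
            (if j + ans.length < toks.length then
               PySem.Int.mod ((h - hv.getD j 0 * top) * rkB + hv.getD (j + ans.length) 0) rkP
             else h)
              = polyH ((hv.drop (j + 1)).take ans.length) % rkP := by
          intro hjm1
          have hlt : j + ans.length < toks.length := by omega
          rw [if_pos hlt, pymod_emod]
          have e1 : Int.ModEq rkP h (polyH ((hv.drop j).take ans.length)) := by
            rw [hinv hjm]
            exact Int.emod_emod_of_dvd _ dvd_rfl
          have e2 : Int.ModEq rkP top (rkB ^ (ans.length - 1)) := by
            rw [htop]
            exact Int.emod_emod_of_dvd _ dvd_rfl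
          have e3 := ((e1.sub ((Int.ModEq.refl (hv.getD j 0)).mul e2)).mul_right rkB).add_right
            (hv.getD (j + ans.length) 0)
          rw [Int.ModEq] at e3
          rw [e3, windowStep hv j ans.length hm1 (by omega)]
        rw [ih (j + 1) _ (by omega) (by omega) hstep, hrange,
          List.find?_cons_of_neg (by simp [hp])]

theorem rkLoop_eq (toks ans : List String) (hv : List Int) (target top : Int) (h : Int)
    (hhv : hv = toks.map tokhash)
    (hm1 : ans ≠ [])
    (hmn : ans.length ≤ toks.length)
    (htarget : target = polyH (ans.map tokhash) % rkP)
    (htop : top = rkB ^ (ans.length - 1) % rkP)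
    (hinv : h = polyH (hv.take ans.length) % rkP) :
    rkLoop toks ans hv target top (toks.length - ans.length + 1) 0 h =
      match (List.range' 0 (toks.length - ans.length + 1)).find? (pMatch toks ans) with
      | some k => [(k : Int), (k : Int) + (ans.length : Int) - 1]
      | none => [0, 0] := by
  have hm1' : 1 ≤ ans.length := List.length_pos_iff.mpr hm1
  exact rkLoop_fuel toks ans hv target top hhv hm1' hmn htarget htop
    (toks.length - ans.length + 1) 0 h (by omega) (by omega) (fun _ => by simpa using hinv)

theorem fm_bridge (story answer : List String) (hne : answer ≠ [])
    (hmn : answer.length ≤ story.length) :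
    (List.range' 0 (story.length - 0)).find? (pMatch story answer)
      = (List.range' 0 (story.length - answer.length + 1)).find? (pMatch story answer) := by
  set n := story.length with hn
  set m := answer.length with hm
  have hm1 : 1 ≤ m := List.length_pos_iff.mpr hne
  set K := n - m + 1 with hK
  have hKle : K ≤ n := by omega
  have hsplit : List.range' 0 (n - 0) = List.range' 0 K ++ List.range' K (n - K) := by
    have h2 := List.range'_append (s := 0) (m := K) (n := n - K) (step := 1)
    simp at h2
    rw [Nat.sub_zero, h2]
    congr 1
    omega
  have hfalse : ∀ x ∈ List.range' K (n - K), ¬ pMatch story answer x = true := by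
    intro x hx hpx
    have hxK : K ≤ x := (List.mem_range'_1.mp hx).1
    have := pMatch_bound hne hpx
    omega
  rw [hsplit, List.find?_append, List.find?_eq_none.mpr hfalse]
  simp

-- one (story, answer) pair: A's per-index body equals B's findSpanB
theorem pair_eq (s a : String)
    (hc : PySem.Str.isIn a s = true → PySem.Str.split₀ s ≠ [] → PySem.Str.split₀ a ≠ []) :
    (if PySem.Str.isIn a s = false then [0, 0]
     else gapScanA (PySem.Str.split₀ s) (PySem.Str.split₀ a) ((PySem.Str.split₀ a).headD "")
          (PySem.Str.split₀ s).length 0)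
      = findSpanB s a := by
  by_cases hin : PySem.Str.isIn a s = false
  · rw [findSpanB, if_pos hin, if_pos hin]
  · have hin' : PySem.Str.isIn a s = true := by simpa using hin
    rw [findSpanB, if_neg hin, if_neg hin]
    show _ = (if (PySem.Str.split₀ a).length = 0 ∨ (PySem.Str.split₀ s).length < (PySem.Str.split₀ a).length then [0,0] else _)
    by_cases hans : PySem.Str.split₀ a = []
    · have htoks : PySem.Str.split₀ s = [] := by
        by_contra htk
        exact (hc hin' htk) hans
      rw [if_pos (Or.inl (by rw [hans]; rfl)), htoks]
      rfl
    · obtain ⟨a0, rest, hcons⟩ : ∃ a0 rest, PySem.Str.split₀ a = a0 :: rest := by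
        cases h : PySem.Str.split₀ a with
        | nil => exact absurd h hans
        | cons a0 rest => exact ⟨a0, rest, rfl⟩
      by_cases hlen : (PySem.Str.split₀ s).length < (PySem.Str.split₀ a).length
      · rw [if_pos (Or.inr hlen), hcons, List.headD_cons,
          gapScanA_eq_fmUp _ _ _ _ 0 (by omega), fmUp_eq_find?,
          List.find?_eq_none.mpr ?_]
        intro x hx hpx
        have := pMatch_bound (answer := a0 :: rest) (by simp) hpx
        rw [← hcons] at this
        omega
      · have hmle : (PySem.Str.split₀ a).length ≤ (PySem.Str.split₀ s).length := by omega
        rw [if_neg (by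
          push Not
          exact ⟨fun h0 => hans (List.length_eq_zero_iff.mp h0), by omega⟩)]
        have h00 : (0 : Int) = PySem.Int.mod 0 rkP := by decide
        have htar : (PySem.Str.split₀ a).foldl
            (fun t s' => PySem.Int.mod (t * rkB + tokhash s') rkP) 0
              = polyH ((PySem.Str.split₀ a).map tokhash) % rkP := by
          rw [h00, ← List.foldl_map (f := tokhash)
            (g := fun t x => PySem.Int.mod (t * rkB + x) rkP), foldl_mod]
          rfl
        have hh0 : (((PySem.Str.split₀ s).map tokhash).take (PySem.Str.split₀ a).length).foldl
            (fun h x => PySem.Int.mod (h * rkB + x) rkP) 0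
              = polyH (((PySem.Str.split₀ s).map tokhash).take (PySem.Str.split₀ a).length) % rkP := by
          rw [h00, foldl_mod]
          rfl
        rw [rkLoop_eq (PySem.Str.split₀ s) (PySem.Str.split₀ a) _ _ _ _ rfl hans hmle
          htar (pymod_emod _) hh0]
        rw [hcons, List.headD_cons, gapScanA_eq_fmUp _ _ _ _ 0 (by omega), fmUp_eq_find?, ← hcons,
          fm_bridge _ _ hans hmle]

theorem outer_eq (ls la : List String) (hlen : ls.length ≤ la.length)
    (hc : ∀ i, i < ls.length →
      PySem.Str.isIn (la.getD i "") (ls.getD i "") = true →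
      PySem.Str.split₀ (ls.getD i "") ≠ [] → PySem.Str.split₀ (la.getD i "") ≠ []) :
    (List.range ls.length).map (fun k =>
        if PySem.Str.isIn (la.getD k "") (ls.getD k "") = false then [(0 : Int), 0]
        else gapScanA (PySem.Str.split₀ (ls.getD k "")) (PySem.Str.split₀ (la.getD k ""))
          ((PySem.Str.split₀ (la.getD k "")).headD "") (PySem.Str.split₀ (ls.getD k "")).length 0)
      = List.zipWith findSpanB ls la := by
  apply List.ext_getElem
  · simp [Nat.min_eq_left hlen]
  · intro i hi1 hi2
    have hi : i < ls.length := by simpa using hi1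
    have hia : i < la.length := by omega
    simp only [List.getElem_map, List.getElem_range, List.getElem_zipWith]
    rw [← List.getD_eq_getElem ls "" hi, ← List.getD_eq_getElem la "" hia]
    exact pair_eq _ _ (hc i hi)

-- ===== VERDICT (by name: the statement is the Claim_ definition above) =====
theorem get_answer_position_spec : Claim_equal_get_answer_position := by
  intro ls la _ hpre
  obtain ⟨hlen, hall⟩ := hpre
  have hc : ∀ i, i < ls.length →
      PySem.Str.isIn (la.getD i "") (ls.getD i "") = true →
      PySem.Str.split₀ (ls.getD i "") ≠ [] → PySem.Str.split₀ (la.getD i "") ≠ [] := by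
    intro i hi hisin hls hla
    have h0 := List.all_eq_true.mp hall i (List.mem_range.mpr hi)
    simp only [Bool.not_eq_eq_eq_not, Bool.not_true, Bool.and_eq_false_iff] at h0
    rcases h0 with (h1 | h2) | h3
    · rw [beq_eq_false_iff_ne] at h1
      exact h1 hla
    · exact hls (by simpa using h2)
    · rw [hisin] at h3
      exact Bool.noConfusion h3
  unfold Spec_get_answer_position get_answer_position get_answer_position_alt
  have hfun : (fun (res : List (List Int)) (i : Int) =>
      let s := PySem.List.pyGetD ls i ""
      let a := PySem.List.pyGetD la i ""
      if PySem.Str.isIn a s = false then res ++ [[0, 0]]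
      else
        let story := PySem.Str.split₀ s
        let answer := PySem.Str.split₀ a
        res ++ [gapScanA story answer (answer.headD "") story.length 0])
      = fun res i => res ++
          [if PySem.Str.isIn (PySem.List.pyGetD la i "") (PySem.List.pyGetD ls i "") = false then [0, 0]
           else gapScanA (PySem.Str.split₀ (PySem.List.pyGetD ls i ""))
             (PySem.Str.split₀ (PySem.List.pyGetD la i ""))
             ((PySem.Str.split₀ (PySem.List.pyGetD la i "")).headD "")
             (PySem.Str.split₀ (PySem.List.pyGetD ls i "")).length 0] := by
    funext res i
    show (if PySem.Str.isIn (PySem.List.pyGetD la i "") (PySem.List.pyGetD ls i "") = false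
        then res ++ [[0, 0]]
        else res ++ [gapScanA (PySem.Str.split₀ (PySem.List.pyGetD ls i ""))
          (PySem.Str.split₀ (PySem.List.pyGetD la i ""))
          ((PySem.Str.split₀ (PySem.List.pyGetD la i "")).headD "")
          (PySem.Str.split₀ (PySem.List.pyGetD ls i "")).length 0]) = _
    split <;> rfl
  rw [hfun, PySem.List.foldl_append_singleton_eq_map, PySem.List.pyRange_zero_natCast,
    List.map_map]
  simp only [List.nil_append, Function.comp_def, PySem.List.pyGetD_natCast]
  exact outer_eq ls la hlen hc
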